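-- pv_equiv track=rewrite | github.com/severianosilva/openclaw-workspace | backup_symlinks/organizacao_backup/controle-prazos/otimizador_tokens.py | criar_resumo_inteligente
-- ===== SOURCE A (Python) =====
-- def criar_resumo_inteligente(texto: str, max_tamanho: int = 4000) -> str:
--     """
--     Cria um resumo inteligente do documento, mantendo apenas as partes mais relevantes
--     """
--     if len(texto) <= max_tamanho:
--         return texto
--
--     # Dividir o texto em segmentos
--     segmentos = texto.split('\n\n')
--
--     # Priorizar segmentos com conteúdo jurídico relevante
--     segmentos_prioritarios = []
--     segmentos_normais = []
--
--     for segmento in segmentos: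
--         if any(palavra in segmento.lower() for palavra in
--                ['vistos', 'relatados', 'fundamentados', 'decido', 'julgo', 'por unanimidade',
--                 'votação', 'acordam', 'negaram provimento', 'deram provimento',
--                 'processo', 'petição', 'sentença', 'despacho', 'recurso',
--                 'cnpj', 'advogado', 'requerente', 'requerido', 'parte autora', 'ré']):
--             segmentos_prioritarios.append(segmento)
--         else:
--             segmentos_normais.append(segmento)
--
--     # Construir resumo mantendo prioridade
--     resumo = []
--     tamanho_atual = 0
--
--     # Adicionar segmentos prioritários primeiro
--     for segmento in segmentos_prioritarios:
--         if tamanho_atual + len(segmento) <= max_tamanho: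
--             resumo.append(segmento)
--             tamanho_atual += len(segmento)
--         else:
--             break
--
--     # Completar com segmentos normais se houver espaço
--     for segmento in segmentos_normais:
--         if tamanho_atual + len(segmento) <= max_tamanho:
--             resumo.append(segmento)
--             tamanho_atual += len(segmento)
--         else:
--             break
--
--     return '\n\n'.join(resumo)
-- ===== SOURCE B (Python) =====
-- _PALAVRAS = ['vistos', 'relatados', 'fundamentados', 'decido', 'julgo', 'por unanimidade',
--              'votação', 'acordam', 'negaram provimento', 'deram provimento',
--              'processo', 'petição', 'sentença', 'despacho', 'recurso',
--              'cnpj', 'advogado', 'requerente', 'requerido', 'parte autora', 'ré']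
--
--
-- def _prioritario(segmento):
--     s = segmento.lower()
--     return any(p in s for p in _PALAVRAS)
--
--
-- def _cumulativo(segs, base):
--     tot, out = base, []
--     for s in segs:
--         tot += len(s)
--         out.append(tot)
--     return out
--
--
-- def criar_resumo_inteligente(texto: str, max_tamanho: int = 4000) -> str:
--     if len(texto) <= max_tamanho:
--         return texto
--     segmentos = texto.split('\n\n')
--     prio = [s for s in segmentos if _prioritario(s)]
--     norm = [s for s in segmentos if not _prioritario(s)]
--     cum_p = _cumulativo(prio, 0)
--     k = len([t for t in cum_p if t <= max_tamanho])
--     base = cum_p[k - 1] if k else 0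
--     cum_n = _cumulativo(norm, base)
--     m = len([t for t in cum_n if t <= max_tamanho])
--     return '\n\n'.join(prio[:k] + norm[:m])
-- ===== Notes on version B (the rewrite author's own statement) =====
-- stated objective: alternative
-- what changed: Replaces A's two greedy accumulate-and-break loops (incremental size counter with early exit) by precomputed cumulative-length tables: each phase's cut is the count of running totals that stay within max_tamanho, the normal phase's table resumes from the priority phase's last kept total, and the answer is the join of the two list-slice prefixes.
import Mathlib
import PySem

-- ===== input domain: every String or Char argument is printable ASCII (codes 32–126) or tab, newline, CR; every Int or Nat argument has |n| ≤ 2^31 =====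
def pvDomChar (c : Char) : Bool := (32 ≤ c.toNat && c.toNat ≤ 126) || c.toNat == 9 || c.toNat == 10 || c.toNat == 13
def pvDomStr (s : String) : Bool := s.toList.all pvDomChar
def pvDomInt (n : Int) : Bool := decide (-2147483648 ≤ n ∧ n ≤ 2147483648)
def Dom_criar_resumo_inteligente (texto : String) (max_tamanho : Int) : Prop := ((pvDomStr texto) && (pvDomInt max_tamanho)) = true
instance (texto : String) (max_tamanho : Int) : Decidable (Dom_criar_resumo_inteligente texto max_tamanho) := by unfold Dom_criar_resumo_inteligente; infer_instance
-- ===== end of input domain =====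

-- B replaces A's two greedy accumulate-and-break loops by cumulative-length tables cut by
-- counting the admissible prefix totals (objective: alternative decomposition, same cost).


-- the literal keyword list both Pythons carry
def pvPalavras : List String :=
  ["vistos", "relatados", "fundamentados", "decido", "julgo", "por unanimidade",
   "votação", "acordam", "negaram provimento", "deram provimento",
   "processo", "petição", "sentença", "despacho", "recurso",
   "cnpj", "advogado", "requerente", "requerido", "parte autora", "ré"]

-- ===== PORT A =====
-- A's 'for segmento in …: if …: append; else: break' loop, as structural recursion on the list
def pvGreedy (segs : List String) (resumo : List String) (tam : Int) (maxT : Int) :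
    List String × Int :=
  match segs with
  | [] => (resumo, tam)
  | s :: rest =>
      if tam + PySem.Str.len s ≤ maxT then
        pvGreedy rest (resumo ++ [s]) (tam + PySem.Str.len s) maxT
      else (resumo, tam)

def criar_resumo_inteligente (texto : String) (max_tamanho : Int) : String :=
  if PySem.Str.len texto ≤ max_tamanho then texto
  else
    -- split? is exact: the separator is the nonempty literal "\n\n", so it is never none
    let segmentos := (PySem.Str.split? texto "\n\n").getD []
    let part := segmentos.foldl
      (fun (acc : List String × List String) seg =>
        if pvPalavras.any (fun p => PySem.Str.isIn p (PySem.Str.lower seg)) then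
          (acc.1 ++ [seg], acc.2)
        else
          (acc.1, acc.2 ++ [seg])) ([], [])
    let r1 := pvGreedy part.1 [] 0 max_tamanho
    let r2 := pvGreedy part.2 r1.1 r1.2 max_tamanho
    PySem.Str.join "\n\n" r2.1

-- ===== PORT B =====
def pvPrioritario (seg : String) : Bool :=
  pvPalavras.any (fun p => PySem.Str.isIn p (PySem.Str.lower seg))

-- Source B's _cumulativo loop: running totals of segment lengths starting from base
def pvCumulativo (segs : List String) (base : Int) : List Int :=
  (segs.foldl (fun (acc : List Int × Int) s =>
      (acc.1 ++ [acc.2 + PySem.Str.len s], acc.2 + PySem.Str.len s)) ([], base)).1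

def criar_resumo_inteligente_alt (texto : String) (max_tamanho : Int) : String :=
  if PySem.Str.len texto ≤ max_tamanho then texto
  else
    let segmentos := (PySem.Str.split? texto "\n\n").getD []
    let prio := segmentos.filter (fun s => pvPrioritario s)
    let norm := segmentos.filter (fun s => !pvPrioritario s)
    let cumP := pvCumulativo prio 0
    -- Source B's cum_p[k - 1] is in range whenever k ≠ 0 (k ≤ cum_p's length), so getD's default is never used
    let k := (cumP.filter (fun t => decide (t ≤ max_tamanho))).length
    let base := if k = 0 then 0 else cumP.getD (k - 1) 0
    let cumN := pvCumulativo norm base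
    let m := (cumN.filter (fun t => decide (t ≤ max_tamanho))).length
    PySem.Str.join "\n\n" (prio.take k ++ norm.take m)

-- ===== PRECONDITION & SPEC =====
def Spec_criar_resumo_inteligente (texto : String) (max_tamanho : Int) (out : String) : Prop := out = criar_resumo_inteligente_alt texto max_tamanho
instance (texto : String) (max_tamanho : Int) (out : String) : Decidable (Spec_criar_resumo_inteligente texto max_tamanho out) := by unfold Spec_criar_resumo_inteligente; infer_instance

-- ===== CLAIM (what is proved, stated in full; the proofs are below) =====
def Claim_equal_criar_resumo_inteligente : Prop := ∀ (texto : String) (max_tamanho : Int), Dom_criar_resumo_inteligente texto max_tamanho → Spec_criar_resumo_inteligente texto max_tamanho (criar_resumo_inteligente texto max_tamanho)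

-- ===== LEMMAS AND PROOFS =====

-- A's single partition loop builds exactly B's two filters
theorem pv_partition (l : List String) (a b : List String) :
    l.foldl
      (fun (acc : List String × List String) seg =>
        if pvPalavras.any (fun p => PySem.Str.isIn p (PySem.Str.lower seg)) then
          (acc.1 ++ [seg], acc.2)
        else
          (acc.1, acc.2 ++ [seg])) (a, b)
    = (a ++ l.filter (fun s => pvPrioritario s), b ++ l.filter (fun s => !pvPrioritario s)) := by
  induction l generalizing a b with
  | nil => simp
  | cons s rest ih =>
      rw [List.foldl_cons]
      by_cases h : (pvPalavras.any fun p => PySem.Str.isIn p (PySem.Str.lower s)) = true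
      · rw [if_pos h, ih]
        have hp : pvPrioritario s = true := h
        simp [hp]
      · rw [if_neg h, ih]
        have hp : pvPrioritario s = false := by
          unfold pvPrioritario; exact Bool.eq_false_iff.mpr h
        simp [hp]

theorem pvCumulativo_fst (l : List String) (a : List Int) (base : Int) :
    (l.foldl (fun (acc : List Int × Int) s =>
      (acc.1 ++ [acc.2 + PySem.Str.len s], acc.2 + PySem.Str.len s)) (a, base)).1
    = a ++ pvCumulativo l base := by
  induction l generalizing a base with
  | nil => simp [pvCumulativo]
  | cons s rest ih =>
      simp only [List.foldl_cons]
      rw [ih]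
      conv_rhs => rw [pvCumulativo]
      simp only [List.foldl_cons]
      rw [ih]
      simp

theorem pvCumulativo_cons (s : String) (rest : List String) (base : Int) :
    pvCumulativo (s :: rest) base
      = (base + PySem.Str.len s) :: pvCumulativo rest (base + PySem.Str.len s) := by
  conv_lhs => rw [pvCumulativo]
  simp only [List.foldl_cons]
  rw [pvCumulativo_fst]
  simp

theorem pv_len_nonneg (s : String) : 0 ≤ PySem.Str.len s := by
  simp [PySem.Str.len_eq]

theorem pvCumulativo_le (l : List String) (base : Int) :
    ∀ x ∈ pvCumulativo l base, base ≤ x := by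
  induction l generalizing base with
  | nil => simp [pvCumulativo]
  | cons s rest ih =>
      rw [pvCumulativo_cons]
      intro x hx
      have hs := pv_len_nonneg s
      rcases List.mem_cons.mp hx with h | h
      · omega
      · have := ih (base + PySem.Str.len s) x h
        omega

-- A's greedy break loop returns B's cut prefix and B's resumed running total
theorem pvGreedy_eq (segs : List String) (r : List String) (t m : Int) :
    pvGreedy segs r t m
      = (r ++ segs.take ((pvCumulativo segs t).filter (fun x => decide (x ≤ m))).length,
         if ((pvCumulativo segs t).filter (fun x => decide (x ≤ m))).length = 0 then t
         else (pvCumulativo segs t).getD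
              (((pvCumulativo segs t).filter (fun x => decide (x ≤ m))).length - 1) 0) := by
  induction segs generalizing r t with
  | nil => simp [pvGreedy, pvCumulativo]
  | cons s rest ih =>
      rw [pvGreedy, pvCumulativo_cons]
      by_cases h : t + PySem.Str.len s ≤ m
      · rw [if_pos h, ih]
        simp only [List.filter_cons, decide_eq_true_eq]
        rw [if_pos h]
        simp only [List.length_cons, Nat.add_sub_cancel, Prod.mk.injEq]
        constructor
        · simp [List.take_succ_cons]
        · by_cases hk : ((pvCumulativo rest (t + PySem.Str.len s)).filter
              (fun x => decide (x ≤ m))).length = 0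
          · rw [if_pos hk, hk]
            simp
          · obtain ⟨n, hn⟩ : ∃ n, ((pvCumulativo rest (t + PySem.Str.len s)).filter
                (fun x => decide (x ≤ m))).length = n + 1 :=
              ⟨((pvCumulativo rest (t + PySem.Str.len s)).filter
                (fun x => decide (x ≤ m))).length - 1, by omega⟩
            rw [hn, if_neg n.succ_ne_zero, if_neg (Nat.succ_ne_zero (n + 1))]
            simp only [Nat.add_sub_cancel, List.getD_cons_succ]
      · rw [if_neg h]
        have hrest : (pvCumulativo rest (t + PySem.Str.len s)).filter
            (fun x => decide (x ≤ m)) = [] := by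
          rw [List.filter_eq_nil_iff]
          intro x hx
          have := pvCumulativo_le rest (t + PySem.Str.len s) x hx
          simp only [decide_eq_true_eq]
          omega
        have hd : decide (t + PySem.Str.len s ≤ m) = false := decide_eq_false h
        simp only [List.filter_cons, hd, Bool.false_eq_true, if_false, hrest]
        simp

-- ===== VERDICT (by name: the statement is the Claim_ definition above) =====
theorem criar_resumo_inteligente_spec : Claim_equal_criar_resumo_inteligente := by
  intro texto max_tamanho _
  unfold Spec_criar_resumo_inteligente
  unfold criar_resumo_inteligente criar_resumo_inteligente_alt
  by_cases h0 : PySem.Str.len texto ≤ max_tamanho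
  · rw [if_pos h0, if_pos h0]
  · rw [if_neg h0, if_neg h0]
    simp only [pv_partition, pvGreedy_eq, List.nil_append]
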